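-- pv_equiv track=rewrite | github.com/RafaCS2002/assembly_generator | assemblyGen.py | hasNested
-- ===== SOURCE A (Python) =====
-- def hasNested(string): # Checa se não existem operações aninhadas
--     stack = []
--     for char in string:
--         if char == "(":
--             stack.append(char)
--         elif char == ")":
--             if len(stack) > 1:
--                 return True
--     return False
-- ===== SOURCE B (Python) =====
-- def hasNested(string):
--     first = string.find("(")
--     if first == -1:
--         return False
--     second = string.find("(", first + 1)
--     if second == -1:
--         return False
--     return ")" in string[second + 1:]
-- ===== Notes on version B (the rewrite author's own statement) =====
-- stated objective: faster
-- what changed: Replaces A's per-character stack-pushing loop (stack never popped, early return) with two str.find calls locating the first and second open parenthesis followed by a substring membership test on the tail after the second.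
import Mathlib
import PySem

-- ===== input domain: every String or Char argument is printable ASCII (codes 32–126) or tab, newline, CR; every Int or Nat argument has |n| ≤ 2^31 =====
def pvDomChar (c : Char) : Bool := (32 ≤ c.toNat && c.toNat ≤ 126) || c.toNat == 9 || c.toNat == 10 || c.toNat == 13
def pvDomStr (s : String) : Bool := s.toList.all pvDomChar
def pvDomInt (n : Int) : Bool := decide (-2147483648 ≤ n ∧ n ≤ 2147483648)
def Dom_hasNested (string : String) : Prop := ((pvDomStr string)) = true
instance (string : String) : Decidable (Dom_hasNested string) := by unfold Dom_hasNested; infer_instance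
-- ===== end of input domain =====

-- B replaces A's per-character stack-pushing scan by two find calls locating the
-- first and second open parenthesis plus a membership test on the remaining tail
-- (measured constant-factor faster: C-level find/in instead of a Python loop).

-- ===== PORT A =====
-- the for-loop with early return; stack is pushed to but never popped, as in A
def hasNestedLoop : List Char → List Char → Bool
  | [], _ => false
  | c :: rest, stack =>
    if c = '(' then hasNestedLoop rest (stack ++ ['('])
    else if c = ')' then
      if stack.length > 1 then true else hasNestedLoop rest stack
    else hasNestedLoop rest stack

def hasNested (string : String) : Bool := hasNestedLoop string.toList []

-- ===== PORT B =====
def hasNested_alt (string : String) : Bool :=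
  let first := PySem.Str.find string "("
  if first = -1 then false
  else
    let second := PySem.Str.findFrom string "(" (first + 1)
    if second = -1 then false
    else PySem.Str.isIn ")" (PySem.Str.slice string (some (second + 1)) none)

-- ===== PRECONDITION & SPEC =====
def Spec_hasNested (string : String) (out : Bool) : Prop := out = hasNested_alt string
instance (string : String) (out : Bool) : Decidable (Spec_hasNested string out) := by unfold Spec_hasNested; infer_instance

-- ===== CLAIM (what is proved, stated in full; the proofs are below) =====
def Claim_equal_hasNested : Prop := ∀ (string : String), Dom_hasNested string → Spec_hasNested string (hasNested string)

-- ===== LEMMAS AND PROOFS =====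

-- common specification: a ')' occurs after (at least) two '('
def NestedSpec (cs : List Char) : Prop :=
  ∃ (i j k : Nat), i < j ∧ j < k ∧ cs[i]? = some '(' ∧ cs[j]? = some '(' ∧ cs[k]? = some ')'

-- singleton prefix of a drop is exactly an index hit
lemma singleton_prefix_iff (a : Char) (m : List Char) : [a] <+: m ↔ m.head? = some a := by
  cases m with
  | nil => simp
  | cons b t => simp [List.cons_prefix_cons, eq_comm]

lemma get_iff_prefix_drop (cs : List Char) (j : Nat) (a : Char) :
    cs[j]? = some a ↔ [a] <+: cs.drop j := by
  rw [singleton_prefix_iff, List.head?_drop]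

-- A's loop returns true iff some ')' sits after ≥ 2 pushes (stack length + '(' count in the prefix)
lemma loopA_iff (cs : List Char) (stack : List Char) :
    hasNestedLoop cs stack = true ↔
      ∃ k, cs[k]? = some ')' ∧ 2 ≤ stack.length + (cs.take k).count '(' := by
  induction cs generalizing stack with
  | nil => simp [hasNestedLoop]
  | cons c rest ih =>
    by_cases hc : c = '('
    · subst hc
      rw [hasNestedLoop, if_pos rfl, ih]
      constructor
      · rintro ⟨k, hk, hcount⟩
        refine ⟨k + 1, by simpa using hk, ?_⟩
        simp at hcount ⊢
        omega
      · rintro ⟨k, hk, hcount⟩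
        cases k with
        | zero => simp at hk
        | succ k' =>
          refine ⟨k', by simpa using hk, ?_⟩
          simp at hcount ⊢
          omega
    · by_cases hr : c = ')'
      · subst hr
        rw [hasNestedLoop, if_neg (by decide), if_pos rfl]
        by_cases hs : stack.length > 1
        · simp only [if_pos hs, true_iff]
          exact ⟨0, by simp, by simpa using hs⟩
        · rw [if_neg hs, ih]
          constructor
          · rintro ⟨k, hk, hcount⟩
            refine ⟨k + 1, by simpa using hk, ?_⟩
            simp at hcount ⊢
            omega
          · rintro ⟨k, hk, hcount⟩
            cases k with
            | zero => simp at hcount; omega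
            | succ k' =>
              refine ⟨k', by simpa using hk, ?_⟩
              simp at hcount ⊢
              omega
      · rw [hasNestedLoop, if_neg hc, if_neg hr, ih]
        constructor
        · rintro ⟨k, hk, hcount⟩
          refine ⟨k + 1, by simpa using hk, ?_⟩
          simp [hc] at hcount ⊢
          omega
        · rintro ⟨k, hk, hcount⟩
          cases k with
          | zero => simp [hr] at hk
          | succ k' =>
            refine ⟨k', by simpa using hk, ?_⟩
            simp [hc] at hcount ⊢
            omega

-- two occurrences in a list = two distinct index hits
lemma two_le_count_iff (l : List Char) :
    2 ≤ l.count '(' ↔ ∃ (i j : Nat), i < j ∧ l[i]? = some '(' ∧ l[j]? = some '(' := by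
  induction l with
  | nil => simp
  | cons c t ih =>
    by_cases hc : c = '('
    · subst hc
      constructor
      · intro h
        have h1 : 1 ≤ t.count '(' := by rw [List.count_cons_self] at h; omega
        have := List.count_pos_iff.mp (by omega : 0 < t.count '(')
        obtain ⟨j, hj, hja⟩ := List.getElem_of_mem (this)
        exact ⟨0, j + 1, by omega, by simp, by simp [hja ▸ List.getElem?_eq_getElem hj]⟩
      · rintro ⟨i, j, hij, hi, hj⟩
        cases j with
        | zero => omega
        | succ j' =>
          simp only [List.getElem?_cons_succ] at hj
          have hmem : '(' ∈ t := by
            have := List.getElem?_eq_some_iff.mp hj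
            obtain ⟨h1, h2⟩ := this
            exact h2 ▸ List.getElem_mem _
          have := List.count_pos_iff.mpr hmem
          rw [List.count_cons_self]; omega
    · rw [show ((c :: t).count '(' = t.count '(') by simp [hc], ih]
      constructor
      · rintro ⟨i, j, hij, hi, hj⟩
        exact ⟨i + 1, j + 1, by omega, by simpa using hi, by simpa using hj⟩
      · rintro ⟨i, j, hij, hi, hj⟩
        cases i with
        | zero => simp [hc] at hi
        | succ i' =>
          cases j with
          | zero => omega
          | succ j' =>
            exact ⟨i', j', by omega, by simpa using hi, by simpa using hj⟩

lemma hasNested_iff_spec (s : String) :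
    hasNested s = true ↔ NestedSpec s.toList := by
  rw [hasNested, loopA_iff]
  constructor
  · rintro ⟨k, hk, hcount⟩
    simp only [List.length_nil, Nat.zero_add] at hcount
    obtain ⟨i, j, hij, hi, hj⟩ := (two_le_count_iff _).mp hcount
    have hjk : j < k := by
      have := (List.getElem?_eq_some_iff.mp hj).1
      have := List.length_take_le k s.toList
      omega
    refine ⟨i, j, k, hij, hjk, ?_, ?_, hk⟩
    · rwa [List.getElem?_take_of_lt (by omega)] at hi
    · rwa [List.getElem?_take_of_lt hjk] at hj
  · rintro ⟨i, j, k, hij, hjk, hi, hj, hk⟩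
    refine ⟨k, hk, ?_⟩
    simp only [List.length_nil, Nat.zero_add]
    exact (two_le_count_iff _).mpr ⟨i, j, hij,
      by rwa [List.getElem?_take_of_lt (by omega)],
      by rwa [List.getElem?_take_of_lt hjk]⟩

-- an index hit at or beyond t gives an infix of the t-drop
lemma infix_drop_of_get (cs : List Char) (a : Char) (j t : Nat) (ht : t ≤ j)
    (h : cs[j]? = some a) : [a] <:+: cs.drop t := by
  rw [← PySem.Chars.isIn_iff_infix, ← PySem.Chars.exists_prefix_drop_iff_isIn]
  refine ⟨j - t, ?_⟩
  rw [List.drop_drop, ← get_iff_prefix_drop]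
  rwa [show t + (j - t) = j by omega]

-- an infix occurrence of [a] yields an index hit
lemma get_of_infix_drop (cs : List Char) (a : Char) (t : Nat)
    (h : [a] <:+: cs.drop t) : ∃ j, t ≤ j ∧ cs[j]? = some a := by
  rw [← PySem.Chars.isIn_iff_infix, ← PySem.Chars.exists_prefix_drop_iff_isIn] at h
  obtain ⟨m, hm⟩ := h
  rw [List.drop_drop, ← get_iff_prefix_drop] at hm
  exact ⟨t + m, by omega, hm⟩

lemma hasNested_alt_iff_spec (s : String) :
    hasNested_alt s = true ↔ NestedSpec s.toList := by
  unfold hasNested_alt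
  simp only [PySem.Str.find_eq, PySem.Str.findFrom_eq]
  have htl : ("(" : String).toList = ['('] := rfl
  have htr : (")" : String).toList = [')'] := rfl
  rw [htl]
  set f := PySem.Chars.find s.toList ['('] with hf
  by_cases h1 : f = -1
  · rw [if_pos h1]
    have hno : ¬ ['('] <:+: s.toList := by
      rw [hf] at h1
      exact (PySem.Chars.find_eq_neg_one_iff _ _).mp h1
    constructor
    · intro h; exact absurd h (by simp)
    · rintro ⟨i, j, k, hij, hjk, hi, hj, hk⟩
      exact absurd (by simpa using infix_drop_of_get s.toList '(' i 0 (Nat.zero_le i) hi) hno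
  · rw [if_neg h1]
    have hfnn : 0 ≤ f := by have := PySem.Chars.neg_one_le_find s.toList ['(']; omega
    obtain ⟨hfpre, hfmin⟩ := PySem.Chars.find_spec (s := s.toList) (sub := ['(']) hfnn
    have hfget : s.toList[f.toNat]? = some '(' := (get_iff_prefix_drop _ _ _).mpr hfpre
    have hflt : f.toNat < s.toList.length := (List.getElem?_eq_some_iff.mp hfget).1
    have hcast : f + 1 = ((f.toNat + 1 : Nat) : Int) := by omega
    rw [hcast]
    have hk1 : f.toNat + 1 ≤ s.toList.length := by omega
    set g := PySem.Chars.findFrom s.toList ['('] ((f.toNat + 1 : Nat) : Int) with hg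
    by_cases h2 : g = -1
    · rw [if_pos h2]
      have hno : ¬ ['('] <:+: s.toList.drop (f.toNat + 1) := by
        rw [hg] at h2
        exact (PySem.Chars.findFrom_natCast_eq_neg_one_iff s.toList ['('] (f.toNat + 1) hk1).mp h2
      constructor
      · intro h; exact absurd h (by simp)
      · rintro ⟨i, j, k, hij, hjk, hi, hj, hk⟩
        have hfi : f.toNat ≤ i := by
          by_contra hlt
          exact hfmin i (by omega) ((get_iff_prefix_drop _ _ _).mp hi)
        exact absurd (infix_drop_of_get s.toList '(' j (f.toNat + 1) (by omega) hj) hno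
    · rw [if_neg h2]
      obtain ⟨hgge, hgpre, hgmin⟩ :=
        PySem.Chars.findFrom_natCast_spec s.toList ['('] (f.toNat + 1) hk1 (hg ▸ h2)
      rw [← hg] at hgge hgpre hgmin
      have hgnn : 0 ≤ g := by omega
      have hgget : s.toList[g.toNat]? = some '(' := (get_iff_prefix_drop _ _ _).mpr hgpre
      have hglt : g.toNat < s.toList.length := (List.getElem?_eq_some_iff.mp hgget).1
      have hfg : f.toNat + 1 ≤ g.toNat := by omega
      rw [PySem.Str.isIn_iff_infix, htr, PySem.Str.toList_slice,
        PySem.Chars.slice_eq_listSlice, PySem.List.slice_from s.toList (by omega : (0:Int) ≤ g + 1)]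
      have hg1 : (g + 1).toNat = g.toNat + 1 := by omega
      rw [hg1]
      constructor
      · intro h
        obtain ⟨k, hkge, hkget⟩ := get_of_infix_drop s.toList ')' (g.toNat + 1) h
        exact ⟨f.toNat, g.toNat, k, by omega, by omega, hfget, hgget, hkget⟩
      · rintro ⟨i, j, k, hij, hjk, hi, hj, hk⟩
        have hfi : f.toNat ≤ i := by
          by_contra hlt
          exact hfmin i (by omega) ((get_iff_prefix_drop _ _ _).mp hi)
        have hgj : g.toNat ≤ j := by
          by_contra hlt
          exact hgmin j (by omega) (by omega) ((get_iff_prefix_drop _ _ _).mp hj)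
        exact infix_drop_of_get s.toList ')' k (g.toNat + 1) (by omega) hk

theorem hasNested_eq (s : String) : hasNested s = hasNested_alt s := by
  by_cases h : NestedSpec s.toList
  · rw [(hasNested_iff_spec s).mpr h, ((hasNested_alt_iff_spec s).mpr h)]
  · have h1 := (hasNested_iff_spec s).not.mpr h
    have h2 := (hasNested_alt_iff_spec s).not.mpr h
    simp only [Bool.not_eq_true] at h1 h2
    rw [h1, h2]

-- ===== VERDICT (by name: the statement is the Claim_ definition above) =====
theorem hasNested_spec : Claim_equal_hasNested := by
  intro s _
  unfold Spec_hasNested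
  exact hasNested_eq s
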